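-- pv_equiv track=rewrite | github.com/DenBugNBA/YandexAlgorithmsTrainings | 4_lesson (1.0)/2/2_word_appearance_number.py | count_word_appearance
-- ===== SOURCE A (Python) =====
-- lines = []
--
-- def count_word_appearance(lines):
--     result = []
--     words_count = {}
--
--     for line in lines:
--         words = line.split()
--
--         for word in words:
--             if word not in words_count:
--                 words_count[word] = 0
--
--             result.append(words_count[word])
--             words_count[word] += 1
--
--     return result
-- ===== SOURCE B (Python) =====
-- def count_word_appearance(lines):
--     # Two-pass: total counts first, then a back-to-front scan maintaining
--     # suffix counts; prior-appearance count = total - suffix count (incl. self).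
--     flat = [w for line in lines for w in line.split()]
--     total = {}
--     for w in flat:
--         total[w] = total.get(w, 0) + 1
--     seen = {}
--     out = []
--     for w in reversed(flat):
--         seen[w] = seen.get(w, 0) + 1
--         out.append(total[w] - seen[w])
--     out.reverse()
--     return out
-- ===== Notes on version B (the rewrite author's own statement) =====
-- stated objective: alternative
-- what changed: B replaces A's single forward pass with a running per-word counter dict by two passes: a total word count, then a backward scan that maintains suffix counts and emits total minus suffix count, building the output back-to-front.
import Mathlib
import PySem

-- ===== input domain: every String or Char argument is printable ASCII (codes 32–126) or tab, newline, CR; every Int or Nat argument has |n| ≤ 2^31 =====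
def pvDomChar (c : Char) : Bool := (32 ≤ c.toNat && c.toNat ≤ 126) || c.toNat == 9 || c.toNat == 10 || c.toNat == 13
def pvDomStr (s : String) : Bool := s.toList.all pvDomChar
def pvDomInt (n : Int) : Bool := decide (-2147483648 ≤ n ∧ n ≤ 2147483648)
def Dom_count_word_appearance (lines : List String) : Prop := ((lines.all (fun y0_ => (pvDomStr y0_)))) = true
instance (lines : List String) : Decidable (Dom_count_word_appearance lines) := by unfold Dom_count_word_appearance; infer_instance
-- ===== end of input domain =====

-- B: two passes (total counts, then a backward suffix-count scan emitting total − suffix, reversed at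
-- the end) instead of A's forward pass with a running counter dict; same O(n) cost, different traversal.

-- ===== PORT A =====
def cwaStepA (st : List Int × PySem.Dict String Int) (word : String) : List Int × PySem.Dict String Int :=
  let d := if st.2.contains word then st.2 else st.2.insert word 0
  (st.1 ++ [d.getD word 0], d.insert word (d.getD word 0 + 1))

def count_word_appearance (lines : List String) : List Int :=
  (lines.foldl (fun st line => (PySem.Str.split₀ line).foldl cwaStepA st)
    (([] : List Int), (PySem.Dict.empty : PySem.Dict String Int))).1

-- ===== PORT B =====
def cwaStepB (total : PySem.Dict String Int) (st : PySem.Dict String Int × List Int) (w : String) :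
    PySem.Dict String Int × List Int :=
  let seen := st.1.insert w (st.1.getD w 0 + 1)
  (seen, st.2 ++ [total.getD w 0 - seen.getD w 0])

def count_word_appearance_alt (lines : List String) : List Int :=
  let flat := lines.flatMap (fun line => PySem.Str.split₀ line)
  let total := flat.foldl (fun d w => d.insert w (d.getD w 0 + 1)) (PySem.Dict.empty : PySem.Dict String Int)
  ((flat.reverse.foldl (cwaStepB total) ((PySem.Dict.empty : PySem.Dict String Int), ([] : List Int))).2).reverse

-- ===== PRECONDITION & SPEC =====
def Spec_count_word_appearance (lines : List String) (out : List Int) : Prop := out = count_word_appearance_alt lines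
instance (lines : List String) (out : List Int) : Decidable (Spec_count_word_appearance lines out) := by unfold Spec_count_word_appearance; infer_instance

-- ===== CLAIM (what is proved, stated in full; the proofs are below) =====
def Claim_equal_count_word_appearance : Prop := ∀ (lines : List String), Dom_count_word_appearance lines → Spec_count_word_appearance lines (count_word_appearance lines)

-- ===== LEMMAS AND PROOFS =====

-- Pure model: running prior-appearance counts of a word list, given counts h of an (implicit) prefix.
def pcModel (h : String → Int) : List String → List Int
  | [] => []
  | w :: ws => h w :: pcModel (fun v => if v = w then h v + 1 else h v) ws

-- A's nested loop is the flat loop over all words.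
theorem cwaA_flat (lines : List String) (st : List Int × PySem.Dict String Int) :
    lines.foldl (fun st line => (PySem.Str.split₀ line).foldl cwaStepA st) st
      = (lines.flatMap (fun line => PySem.Str.split₀ line)).foldl cwaStepA st := by
  induction lines generalizing st with
  | nil => rfl
  | cons l ls ih => simp [List.flatMap_cons, List.foldl_append, ih]

-- A's loop computes the model, given that the dict agrees with h.
theorem cwaA_model (ws : List String) (res : List Int) (d : PySem.Dict String Int)
    (h : String → Int) (hd : ∀ v, d.getD v 0 = h v) :
    (ws.foldl cwaStepA (res, d)).1 = res ++ pcModel h ws := by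
  induction ws generalizing res d h with
  | nil => simp [pcModel]
  | cons w ws ih =>
    have hw : (if d.contains w then d else d.insert w 0).getD w 0 = h w := by
      by_cases hc : d.contains w = true
      · simp [hc, hd w]
      · rw [← hd w, PySem.Dict.getD_of_not_contains d 0 (by simpa using hc)]
        simp [hc, PySem.Dict.getD_insert_self]
    have hne : ∀ v, v ≠ w → (if d.contains w then d else d.insert w 0).getD v 0 = h v := by
      intro v hv
      by_cases hc : d.contains w = true
      · simp [hc, hd v]
      · simp [hc, PySem.Dict.getD_insert_of_ne d 0 0 hv, hd v]
    rw [List.foldl_cons]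
    have step : cwaStepA (res, d) w =
        (res ++ [(if d.contains w then d else d.insert w 0).getD w 0],
         (if d.contains w then d else d.insert w 0).insert w
           ((if d.contains w then d else d.insert w 0).getD w 0 + 1)) := rfl
    rw [step, hw,
      ih (res ++ [h w]) _ (fun v => if v = w then h v + 1 else h v) ?_, pcModel]
    · simp
    · intro v
      rw [PySem.Dict.getD_insert]
      by_cases hv : v = w
      · simp [hv]
      · simp [hv, hne v hv]

-- B's dict component is the plain counting fold.
theorem cwaB_dict (l : List String) (total : PySem.Dict String Int)
    (st : PySem.Dict String Int × List Int) :
    (l.foldl (cwaStepB total) st).1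
      = l.foldl (fun d w => d.insert w (d.getD w 0 + 1)) st.1 := by
  induction l generalizing st with
  | nil => rfl
  | cons w l ih => rw [List.foldl_cons, List.foldl_cons, ih]; rfl

-- B's backward scan over the suffix computes the model with the prefix's counts.
theorem cwaB_model (flat : List String) (suf pre : List String) (hsplit : pre ++ suf = flat) :
    ((suf.reverse.foldl
        (cwaStepB (flat.foldl (fun d w => d.insert w (d.getD w 0 + 1)) PySem.Dict.empty))
        ((PySem.Dict.empty : PySem.Dict String Int), ([] : List Int))).2).reverse
      = pcModel (fun v => ((pre.count v : Int))) suf := by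
  induction suf generalizing pre with
  | nil => simp [pcModel]
  | cons w rest ih =>
    have htot : (flat.foldl (fun d w => d.insert w (d.getD w 0 + 1))
        (PySem.Dict.empty : PySem.Dict String Int)).getD w 0
        = ((pre.count w : Int)) + 1 + rest.count w := by
      rw [PySem.Dict.getD_foldl_insert_add_one]
      subst hsplit
      simp [List.count_append]
      ring
    have hseen : ((rest.reverse.foldl
        (cwaStepB (flat.foldl (fun d w => d.insert w (d.getD w 0 + 1)) PySem.Dict.empty))
        ((PySem.Dict.empty : PySem.Dict String Int), ([] : List Int))).1).getD w 0
        = (rest.count w : Int) := by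
      rw [cwaB_dict, PySem.Dict.getD_foldl_insert_add_one]
      simp
    rw [List.reverse_cons, List.foldl_append]
    rw [pcModel]
    have hrest := ih (pre ++ [w]) (by simpa using hsplit)
    have hfun : (fun v => (((pre ++ [w]).count v : Nat) : Int))
        = (fun v => if v = w then ((pre.count v : Nat) : Int) + 1 else ((pre.count v : Nat) : Int)) := by
      funext v
      by_cases hv : v = w
      · subst hv; simp [List.count_append]
      · simp [List.count_append, List.count_eq_zero, hv]
    rw [hfun] at hrest
    rw [List.foldl_cons, List.foldl_nil]
    show ((_ : PySem.Dict String Int × List Int).2).reverse = _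
    rw [show ∀ (S : PySem.Dict String Int × List Int) t,
        cwaStepB t S w = (S.1.insert w (S.1.getD w 0 + 1),
          S.2 ++ [t.getD w 0 - (S.1.insert w (S.1.getD w 0 + 1)).getD w 0]) from fun _ _ => rfl]
    simp only [List.reverse_append, List.reverse_cons, List.reverse_nil, List.nil_append,
      List.cons_append, PySem.Dict.getD_insert_self, hseen, htot, hrest]
    congr 1
    omega

-- ===== VERDICT (by name: the statement is the Claim_ definition above) =====
theorem count_word_appearance_spec : Claim_equal_count_word_appearance := by
  intro lines _
  unfold Spec_count_word_appearance count_word_appearance count_word_appearance_alt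
  rw [cwaA_flat]
  rw [cwaA_model _ [] PySem.Dict.empty (fun _ => 0) (fun v => by simp [PySem.Dict.getD_empty])]
  rw [cwaB_model (lines.flatMap (fun line => PySem.Str.split₀ line))
      (lines.flatMap (fun line => PySem.Str.split₀ line)) [] rfl]
  simp
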